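-- pv_equiv track=rewrite | github.com/younesStrittmatter/sweetPeaBush | packages/peaGrow/src/bush/generate_factors.py | complete_from_prefix
-- ===== SOURCE A (Python) =====
-- from typing import Dict, Sequence, List, Any, Union, Tuple, Iterable, Optional
--
-- def complete_from_prefix(prefix: List[int], N: int, k: int, min_block: int = 1) -> Iterable[List[int]]:
--     """
--     Finish an RGS partition from a given prefix (length m <= N).
--     Ensures labels in 0..k-1; final partition uses exactly k labels (surjection) with min_block size.
--     """
--     m = len(prefix)
--     if m > N:
--         return  # nothing to yield
--     if m == 0:
--         prefix = [0]
--         m = 1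
--
--     if m == N:
--         max_used = max(prefix) if prefix else -1
--         if max_used == k - 1:
--             sizes = [0] * k
--             for lab in prefix:
--                 if 0 <= lab < k:
--                     sizes[lab] += 1
--                 else:
--                     return
--             if all(s >= min_block for s in sizes[:k]):
--                 yield prefix[:]
--         return
--
--     # Initialize g and sizes
--     g = prefix[:] + [0] * (N - m)
--     sizes = [0] * k
--     for lab in prefix:
--         if 0 <= lab < k:
--             sizes[lab] += 1
--         else:
--             return
--     max_used = max(prefix) if prefix else 0
--
--     # Backtrack from position m-1, so nxt starts at m
--     def bt(i: int, max_used_local: int):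
--         nxt = i + 1
--         upper = min(max_used_local + 1, k - 1)
--         for lab in range(0, upper + 1):
--             g[nxt] = lab
--             sizes[lab] += 1
--             remain = (N - 1) - nxt
--             new_max = max(max_used_local, lab)
--             needed = (k - 1 - new_max)
--             feasible = (remain >= max(0, needed))
--             if feasible:
--                 if nxt == N - 1:
--                     if new_max == k - 1 and all(s >= min_block for s in sizes[:k]):
--                         yield g[:]
--                 else:
--                     yield from bt(nxt, new_max)
--             sizes[lab] -= 1
--
--     yield from bt(m - 1, max_used)
-- ===== SOURCE B (Python) =====
-- def complete_from_prefix(prefix, N, k, min_block=1):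
--     """Breadth-first re-implementation: expand a frontier of partial RGS words
--     level by level (dropping words that can no longer reach k labels), then
--     filter full words by surjectivity and block sizes."""
--     if not prefix:
--         prefix = [0]
--     m = len(prefix)
--     if m > N:
--         return []
--     if any(not (0 <= lab < k) for lab in prefix):
--         return []
--     frontier = [list(prefix)]
--     for _ in range(N - m):
--         frontier = [q
--                     for p in frontier
--                     for q in (p + [lab] for lab in range(min(max(p) + 1, k - 1) + 1))
--                     if N - len(q) >= k - 1 - max(q)]
--     out = []
--     for p in frontier:
--         if max(p) == k - 1 and all(p.count(lab) >= min_block for lab in range(k)):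
--             out.append(p)
--     return out
-- ===== Notes on version B (the rewrite author's own statement) =====
-- stated objective: alternative
-- what changed: Replaced the recursive generator bt with shared mutable g/sizes arrays by a breadth-first frontier expansion (level-by-level list comprehension with a per-level reachability filter) followed by one final surjectivity/min-block filter; no recursion or per-branch state mutation remains.
import Mathlib
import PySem

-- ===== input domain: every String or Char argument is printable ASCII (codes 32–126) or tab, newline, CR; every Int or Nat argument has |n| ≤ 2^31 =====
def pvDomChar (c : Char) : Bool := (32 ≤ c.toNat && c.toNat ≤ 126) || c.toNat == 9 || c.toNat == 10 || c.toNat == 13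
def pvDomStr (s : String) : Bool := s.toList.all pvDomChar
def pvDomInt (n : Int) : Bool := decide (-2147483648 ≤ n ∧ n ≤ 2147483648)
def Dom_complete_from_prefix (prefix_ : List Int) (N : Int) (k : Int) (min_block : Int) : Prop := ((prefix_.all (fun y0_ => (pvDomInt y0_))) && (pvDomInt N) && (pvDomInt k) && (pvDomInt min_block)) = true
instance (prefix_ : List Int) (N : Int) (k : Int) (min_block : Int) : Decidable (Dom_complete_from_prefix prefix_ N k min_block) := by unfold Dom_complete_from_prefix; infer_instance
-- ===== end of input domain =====

-- B replaces A's recursive backtracker (shared mutable g/sizes arrays) by a breadth-first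
-- frontier expansion (with a per-level reachability filter) followed by one final
-- surjectivity/min-block filter; objective: alternative (same asymptotic cost, no speed
-- claim). A is a generator; equivalence is about the list of yielded values.

-- ===== PORT A =====

-- Python max(l) for nonempty l (the ports only call it on nonempty lists).
def pyMax (l : List Int) : Int :=
  match l with
  | [] => 0
  | h :: t => t.foldl max h

-- the 'for lab in prefix: if 0 <= lab < k: sizes[lab] += 1 else: return' loop;
-- none = the early 'return'.  lab.toNat is exact here: the index is only used when 0 ≤ lab.
def countsOf? (k : Int) : List Int → List Int → Option (List Int)
  | sizes, [] => some sizes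
  | sizes, lab :: rest =>
    if 0 ≤ lab ∧ lab < k then
      countsOf? k (sizes.set lab.toNat (sizes.getD lab.toNat 0 + 1)) rest
    else none

-- the inner generator bt, with g and sizes passed as values (the Python mutations are
-- bracketed: sizes is restored after each label, g[nxt] is overwritten before any read,
-- so value passing is exact); fuel = N - m bounds the recursion depth and is never
-- exhausted on the calls the port makes.  Indices nxt, lab are nonnegative where used.
def btA (N k min_block : Int) : Nat → Int → Int → List Int → List Int → List (List Int)
  | 0, _, _, _, _ => []
  | fuel+1, i, mxl, g, sizes =>
    let nxt := i + 1
    let upper := min (mxl + 1) (k - 1)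
    (PySem.List.pyRange 0 (upper + 1) 1).foldl (fun acc lab =>
      let g2 := g.set nxt.toNat lab
      let sizes2 := sizes.set lab.toNat (sizes.getD lab.toNat 0 + 1)
      let remain := (N - 1) - nxt
      let new_max := max mxl lab
      let needed := k - 1 - new_max
      if remain ≥ max 0 needed then
        if nxt = N - 1 then
          if new_max = k - 1 ∧ (sizes2.take k.toNat).all (fun s => decide (min_block ≤ s)) then
            acc ++ [g2]
          else acc
        else acc ++ btA N k min_block fuel nxt new_max g2 sizes2
      else acc) []

def complete_from_prefix (prefix_ : List Int) (N : Int) (k : Int) (min_block : Int) : List (List Int) :=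
  let m : Int := prefix_.length
  if m > N then []
  else
    let pm := if m = 0 then (([0] : List Int), (1 : Int)) else (prefix_, m)
    let prefix2 := pm.1
    let m2 := pm.2
    if m2 = N then
      let max_used := if prefix2.isEmpty then -1 else pyMax prefix2
      if max_used = k - 1 then
        match countsOf? k (List.replicate k.toNat 0) prefix2 with
        | none => []
        | some sizes =>
          if (sizes.take k.toNat).all (fun s => decide (min_block ≤ s)) then [prefix2] else []
      else []
    else
      let g := prefix2 ++ List.replicate (N - m2).toNat 0
      match countsOf? k (List.replicate k.toNat 0) prefix2 with
      | none => []
      | some sizes =>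
        let max_used := if prefix2.isEmpty then 0 else pyMax prefix2
        btA N k min_block (N - m2).toNat (m2 - 1) max_used g sizes

-- ===== PORT B =====

-- the final filter's test: max(p) == k-1 and all blocks at least min_block
def okB (k min_block : Int) (p : List Int) : Bool :=
  decide (pyMax p = k - 1) &&
    (PySem.List.pyRange 0 k 1).all (fun lab => decide (min_block ≤ (PySem.List.count p lab : Int)))

def complete_from_prefix_alt (prefix_ : List Int) (N : Int) (k : Int) (min_block : Int) : List (List Int) :=
  let prefix2 := if prefix_.isEmpty then [0] else prefix_
  let m : Int := prefix2.length
  if m > N then []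
  else if prefix2.any (fun lab => !(decide (0 ≤ lab) && decide (lab < k))) then []
  else
    let frontier := (List.range (N - m).toNat).foldl
      (fun fr _ => fr.flatMap (fun p =>
        ((PySem.List.pyRange 0 (min (pyMax p + 1) (k - 1) + 1) 1).map (fun lab => p ++ [lab])).filter
          (fun q => decide (N - (q.length : Int) ≥ k - 1 - pyMax q))))
      [prefix2]
    frontier.foldl (fun out p => if okB k min_block p then out ++ [p] else out) []

-- ===== PRECONDITION & SPEC =====

-- Pre_ excludes only the inputs where A raises IndexError: the empty prefix with N = 0 and
-- k ≥ 1 (A normalizes [] to [0] after its m > N check and then writes g[1] in a word of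
-- length 0).  Everywhere else A returns normally.
def Pre_complete_from_prefix (prefix_ : List Int) (N : Int) (k : Int) (min_block : Int) : Prop :=
  ¬ (prefix_ = [] ∧ N = 0 ∧ 1 ≤ k)
instance (prefix_ : List Int) (N : Int) (k : Int) (min_block : Int) : Decidable (Pre_complete_from_prefix prefix_ N k min_block) := by unfold Pre_complete_from_prefix; infer_instance

def pvWitness_complete_from_prefix : List Int × Int × Int × Int := ([0, 1], 4, 2, 1)

def Spec_complete_from_prefix (prefix_ : List Int) (N : Int) (k : Int) (min_block : Int) (out : List (List Int)) : Prop := out = complete_from_prefix_alt prefix_ N k min_block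
instance (prefix_ : List Int) (N : Int) (k : Int) (min_block : Int) (out : List (List Int)) : Decidable (Spec_complete_from_prefix prefix_ N k min_block out) := by unfold Spec_complete_from_prefix; infer_instance

-- ===== CLAIM (what is proved, stated in full; the proofs are below) =====
def Claim_equal_complete_from_prefix : Prop := ∀ (prefix_ : List Int) (N : Int) (k : Int) (min_block : Int), Dom_complete_from_prefix prefix_ N k min_block → Pre_complete_from_prefix prefix_ N k min_block → Spec_complete_from_prefix prefix_ N k min_block (complete_from_prefix prefix_ N k min_block)

-- ===== LEMMAS AND PROOFS =====

-- B-side expansion tree (proof-side view of B's frontier loop)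
def expand1 (k : Int) (p : List Int) : List (List Int) :=
  (PySem.List.pyRange 0 (min (pyMax p + 1) (k - 1) + 1) 1).map (fun lab => p ++ [lab])

def expandT (k : Int) : Nat → List Int → List (List Int)
  | 0, p => [p]
  | n+1, p => (expand1 k p).flatMap (expandT k n)

-- pruned expansion: B's frontier step keeps only words that can still reach k labels
def expand1P (N k : Int) (p : List Int) : List (List Int) :=
  (expand1 k p).filter (fun q => decide (N - (q.length : Int) ≥ k - 1 - pyMax q))

def expandP (N k : Int) : Nat → List Int → List (List Int)
  | 0, p => [p]
  | n+1, p => (expand1P N k p).flatMap (expandP N k n)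

theorem pyMax_append_singleton {l : List Int} (h : l ≠ []) (x : Int) :
    pyMax (l ++ [x]) = max (pyMax l) x := by
  match l with
  | h' :: t => simp [pyMax, List.foldl_append]

theorem countsOf?_none {k : Int} {p : List Int}
    (h : ∃ lab ∈ p, ¬ (0 ≤ lab ∧ lab < k)) : ∀ (sizes : List Int),
    countsOf? k sizes p = none := by
  induction p with
  | nil => simp at h
  | cons lab rest ih =>
    intro sizes
    obtain ⟨x, hx, hnx⟩ := h
    rcases List.mem_cons.1 hx with rfl | hm
    · simp [countsOf?, hnx]
    · by_cases hv : 0 ≤ lab ∧ lab < k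
      · simp only [countsOf?, if_pos hv]; exact ih ⟨x, hm, hnx⟩ _
      · simp [countsOf?, hv]

theorem countsOf?_some {k : Int} {p : List Int}
    (h : ∀ lab ∈ p, 0 ≤ lab ∧ lab < k) :
    ∀ sizes : List Int, k.toNat ≤ sizes.length →
      ∃ sizes', countsOf? k sizes p = some sizes' ∧ sizes'.length = sizes.length ∧
        ∀ j : Nat, j < sizes.length →
          sizes'.getD j 0 = sizes.getD j 0 + (p.count (j : Int) : Int) := by
  induction p with
  | nil => intro sizes _; exact ⟨sizes, rfl, rfl, by simp⟩
  | cons lab rest ih =>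
    intro sizes hk
    have hv := h lab List.mem_cons_self
    have hlab : lab.toNat < sizes.length := by omega
    obtain ⟨sizes', h1, h2, h3⟩ := ih (fun x hx => h x (List.mem_cons_of_mem _ hx))
      (sizes.set lab.toNat (sizes.getD lab.toNat 0 + 1)) (by simpa using hk)
    refine ⟨sizes', ?_, by simpa using h2, ?_⟩
    · show countsOf? k sizes (lab :: rest) = some sizes'
      unfold countsOf?
      rw [if_pos hv]
      exact h1
    intro j hj
    have h3' := h3 j (by simpa using hj)
    rw [h3']
    by_cases hje : j = lab.toNat
    · subst hje
      rw [List.getD_eq_getElem _ _ hj, List.getD_eq_getElem _ _ (by simpa using hj)]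
      simp only [List.getElem_set_self]
      have hlabe : ((lab.toNat : Int)) = lab := by omega
      simp [hlabe]
      ring
    · rw [List.getD_eq_getElem _ _ hj, List.getD_eq_getElem _ _ (by simpa using hj)]
      rw [List.getElem_set_ne (by omega)]
      have : ¬ ((lab : Int) = (j : Int)) := by omega
      rw [← List.getD_eq_getElem sizes 0 hj]
      simp [this]

theorem expandP_snoc (N k : Int) : ∀ (n : Nat) (p : List Int),
    (expandP N k n p).flatMap (expand1P N k) = expandP N k (n + 1) p := by
  intro n
  induction n with
  | zero => intro p; simp [expandP]
  | succ n ih =>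
    intro p
    show ((expand1P N k p).flatMap (expandP N k n)).flatMap (expand1P N k) = _
    rw [List.flatMap_assoc]
    simp only [ih]
    rfl

theorem frontier_eq (N k : Int) (n : Nat) (p : List Int) :
    (List.range n).foldl
      (fun fr _ => fr.flatMap (fun q =>
        ((PySem.List.pyRange 0 (min (pyMax q + 1) (k - 1) + 1) 1).map (fun lab => q ++ [lab])).filter
          (fun q' => decide (N - (q'.length : Int) ≥ k - 1 - pyMax q'))))
      [p] = expandP N k n p := by
  induction n with
  | zero => simp [expandP]
  | succ n ih =>
    rw [List.range_succ, List.foldl_append, ih]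
    show (expandP N k n p).flatMap (expand1P N k) = _
    exact expandP_snoc N k n p

theorem flatMap_congr_mem {α β : Type} (l : List α) (f g : α → List β)
    (h : ∀ a ∈ l, f a = g a) : l.flatMap f = l.flatMap g := by
  induction l with
  | nil => rfl
  | cons a t ih =>
    simp only [List.flatMap_cons]
    rw [h a List.mem_cons_self, ih (fun x hx => h x (List.mem_cons_of_mem _ hx))]

theorem expandT_max_le (k : Int) : ∀ (n : Nat) (p q : List Int), p ≠ [] →
    q ∈ expandT k n p → q ≠ [] ∧ pyMax q ≤ pyMax p + n := by
  intro n
  induction n with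
  | zero => intro p q hp hq; simp [expandT] at hq; subst hq; exact ⟨hp, by simp⟩
  | succ n ih =>
    intro p q hp hq
    simp only [expandT, List.mem_flatMap, expand1, List.mem_map] at hq
    obtain ⟨q', ⟨lab, hlab, rfl⟩, hq⟩ := hq
    have hlab' := (PySem.List.mem_pyRange_one.1 hlab).2
    have h := ih (p ++ [lab]) q (by simp) hq
    refine ⟨h.1, ?_⟩
    have := h.2
    rw [pyMax_append_singleton hp] at this
    have : pyMax q ≤ max (pyMax p) lab + n := this
    omega

theorem expandT_prune {k min_block : Int} {n : Nat} {p : List Int} (hp : p ≠ [])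
    (h : (n : Int) < k - 1 - pyMax p) :
    (expandT k n p).filter (okB k min_block) = [] := by
  rw [List.filter_eq_nil_iff]
  intro q hq
  have hb := expandT_max_le k n p q hp hq
  simp only [okB, Bool.and_eq_true, decide_eq_true_eq, not_and]
  intro hmax
  omega

theorem sizes_all_iff {k min_block : Int} {q sizes : List Int}
    (hlen : sizes.length = k.toNat)
    (hcnt : ∀ j : Nat, j < k.toNat → sizes.getD j 0 = ((q.count (j : Int) : Int))) :
    ((sizes.take k.toNat).all (fun s => decide (min_block ≤ s))
      = (PySem.List.pyRange 0 k 1).all (fun lab => decide (min_block ≤ (PySem.List.count q lab : Int)))) := by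
  rw [Bool.eq_iff_iff]
  rw [← hlen, List.take_length]
  simp only [List.all_eq_true, decide_eq_true_eq, PySem.List.count_eq]
  constructor
  · intro hall lab hlab
    have hm := PySem.List.mem_pyRange_one.1 hlab
    have hj : lab.toNat < k.toNat := by omega
    have := hcnt lab.toNat (by omega)
    have he : ((lab.toNat : Int)) = lab := by omega
    rw [he] at this
    have hmem : sizes.getD lab.toNat 0 ∈ sizes := by
      rw [List.getD_eq_getElem _ _ (by omega)]; exact List.getElem_mem _
    have := hall _ hmem
    omega
  · intro hall s hs
    obtain ⟨j, hj, rfl⟩ := List.mem_iff_getElem.1 hs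
    rw [← List.getD_eq_getElem sizes 0 hj]
    rw [hcnt j (by omega)]
    have hlab : ((j : Int)) ∈ PySem.List.pyRange 0 k 1 := by
      rw [PySem.List.mem_pyRange_one]; omega
    exact hall _ hlab

theorem set_counts {sizes p : List Int} {k lab : Int}
    (hlen : sizes.length = k.toNat)
    (h : ∀ j : Nat, j < k.toNat → sizes.getD j 0 = (p.count (j : Int) : Int))
    (h0 : 0 ≤ lab) (h1 : lab < k) :
    ∀ j : Nat, j < k.toNat →
      (sizes.set lab.toNat (sizes.getD lab.toNat 0 + 1)).getD j 0
        = ((p ++ [lab]).count (j : Int) : Int) := by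
  intro j hj
  have hjl : j < sizes.length := by omega
  have hlabl : lab.toNat < sizes.length := by omega
  rw [List.getD_eq_getElem _ _ (by simpa using hjl)]
  by_cases hje : j = lab.toNat
  · subst hje
    simp only [List.getElem_set_self]
    rw [h lab.toNat hj]
    have he : ((lab.toNat : Int)) = lab := by omega
    simp [List.count_append, he]
  · rw [List.getElem_set_ne (by omega)]
    rw [← List.getD_eq_getElem sizes 0 hjl, h j hj]
    have he : ¬ ((lab : Int) = (j : Int)) := by omega
    simp [List.count_append, he]

theorem btA_eq (N k min_block : Int) : ∀ (fuel : Nat) (p sizes : List Int),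
    p ≠ [] →
    (∀ lab ∈ p, 0 ≤ lab ∧ lab < k) →
    ((p.length : Int) < N) →
    fuel = (N - (p.length : Int)).toNat →
    sizes.length = k.toNat →
    (∀ j : Nat, j < k.toNat → sizes.getD j 0 = (p.count (j : Int) : Int)) →
    btA N k min_block fuel ((p.length : Int) - 1) (pyMax p)
        (p ++ List.replicate (N - (p.length : Int)).toNat 0) sizes
      = (expandT k (N - (p.length : Int)).toNat p).filter (okB k min_block) := by
  intro fuel
  induction fuel with
  | zero => intro p sizes _ _ hlt hf _ _; omega
  | succ f ih =>
    intro p sizes hp hvalid hlt hf hlen hcnt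
    have hr : (N - (p.length : Int)).toNat = f + 1 := hf.symm
    rw [hr]
    -- unfold one level of btA
    show (PySem.List.pyRange 0 (min (pyMax p + 1) (k - 1) + 1) 1).foldl _ [] = _
    rw [PySem.List.foldl_congr_mem _ _
      (fun acc lab => acc ++ (expandT k f (p ++ [lab])).filter (okB k min_block)) [] ?_]
    · rw [PySem.List.foldl_append_eq_flatMap, List.nil_append]
      -- RHS side
      show _ = (expandT k (f + 1) p).filter (okB k min_block)
      rw [show expandT k (f+1) p = (expand1 k p).flatMap (expandT k f) from rfl]
      rw [List.filter_flatMap]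
      rw [expand1, List.flatMap_map]
    · intro acc lab hlab
      obtain ⟨hlab0, hlab1⟩ := PySem.List.mem_pyRange_one.1 hlab
      -- names
      have hnxt : ((p.length : Int) - 1 + 1) = (p.length : Int) := by ring
      have hlabk : lab < k := by omega
      have hpmax : pyMax (p ++ [lab]) = max (pyMax p) lab := pyMax_append_singleton hp lab
      have hfi : (f : Int) = N - (p.length : Int) - 1 := by omega
      -- g2
      have hg2 : (p ++ List.replicate (f + 1) 0).set ((p.length : Int)).toNat lab
          = (p ++ [lab]) ++ List.replicate f 0 := by
        simp [List.replicate_succ]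
      simp only [hnxt, hg2]
      by_cases hfeas : (N - 1) - (p.length : Int) ≥ max 0 (k - 1 - max (pyMax p) lab)
      · rw [if_pos hfeas]
        by_cases hleaf : (p.length : Int) = N - 1
        · rw [if_pos hleaf]
          have hf0 : f = 0 := by omega
          subst hf0
          have hall := sizes_all_iff (k := k) (min_block := min_block) (q := p ++ [lab])
            (sizes := sizes.set lab.toNat (sizes.getD lab.toNat 0 + 1))
            (by simpa using hlen) (set_counts hlen hcnt hlab0 hlabk)
          simp only [expandT, List.filter_singleton, okB, hpmax, ← hall,
            List.replicate_zero, List.append_nil]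
          cases hsz : ((sizes.set lab.toNat (sizes.getD lab.toNat 0 + 1)).take k.toNat).all
              (fun s => decide (min_block ≤ s)) <;>
            by_cases hok : max (pyMax p) lab = k - 1 <;>
              simp [hok]
        · rw [if_neg hleaf]
          have hplt : ((p.length : Int) + 1) < N := by omega
          have hv' : ∀ x ∈ p ++ [lab], 0 ≤ x ∧ x < k := by
            intro x hx
            rcases List.mem_append.1 hx with hx | hx
            · exact hvalid x hx
            · simp at hx; subst hx; exact ⟨hlab0, hlabk⟩
          have hrec := ih (p ++ [lab]) (sizes.set lab.toNat (sizes.getD lab.toNat 0 + 1))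
            (by simp) hv' (by simpa using hplt) (by simp; omega) (by simpa using hlen)
            (set_counts hlen hcnt hlab0 hlabk)
          have e1 : ((p ++ [lab]).length : Int) - 1 = (p.length : Int) := by simp
          have e2 : (N - ((p ++ [lab]).length : Int)).toNat = f := by simp; omega
          rw [e1, e2, hpmax] at hrec
          rw [hrec]
      · rw [if_neg hfeas]
        have hprune : (expandT k f (p ++ [lab])).filter (okB k min_block) = [] := by
          apply expandT_prune (by simp)
          rw [hpmax]
          omega
        rw [hprune, List.append_nil]

theorem filter_flatMap_left {α β : Type} (l : List α) (f : α → Bool) (g : α → List β) :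
    (l.filter f).flatMap g = l.flatMap (fun a => if f a then g a else []) := by
  induction l with
  | nil => rfl
  | cons a t ih =>
    by_cases hf : f a <;> simp [hf, ih]

theorem expandP_filter (N k min_block : Int) : ∀ (n : Nat) (p : List Int), p ≠ [] →
    ((p.length : Int) + n = N) →
    (expandP N k n p).filter (okB k min_block) = (expandT k n p).filter (okB k min_block) := by
  intro n
  induction n with
  | zero => intro p _ _; rfl
  | succ n ih =>
    intro p hp hlen
    show ((expand1P N k p).flatMap (expandP N k n)).filter _
        = ((expand1 k p).flatMap (expandT k n)).filter _
    rw [List.filter_flatMap, List.filter_flatMap, expand1P, filter_flatMap_left]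
    apply flatMap_congr_mem
    intro q hq
    obtain ⟨lab, _, rfl⟩ := List.mem_map.1 hq
    have hq1 : (p ++ [lab]) ≠ [] := by simp
    have hqlen : (((p ++ [lab]).length : Int)) + n = N := by simp; omega
    by_cases hfeas : N - (((p ++ [lab]).length : Int)) ≥ k - 1 - pyMax (p ++ [lab])
    · rw [if_pos (by simpa using hfeas)]
      exact ih (p ++ [lab]) hq1 hqlen
    · rw [if_neg (by simpa using hfeas)]
      rw [expandT_prune hq1 (by omega)]

theorem core_eq (N k min_block : Int) (p : List Int) (hp : p ≠ []) (hle : (p.length : Int) ≤ N) :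
    (if (p.length : Int) = N then
        (if pyMax p = k - 1 then
          match countsOf? k (List.replicate k.toNat 0) p with
          | none => []
          | some sizes =>
            if (sizes.take k.toNat).all (fun s => decide (min_block ≤ s)) then [p] else []
        else [])
      else
        match countsOf? k (List.replicate k.toNat 0) p with
        | none => []
        | some sizes =>
          btA N k min_block (N - (p.length : Int)).toNat ((p.length : Int) - 1) (pyMax p)
            (p ++ List.replicate (N - (p.length : Int)).toNat 0) sizes)
    = (if p.any (fun lab => !(decide (0 ≤ lab) && decide (lab < k))) then []
      else
        ((List.range (N - (p.length : Int)).toNat).foldl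
          (fun fr _ => fr.flatMap (fun q =>
            ((PySem.List.pyRange 0 (min (pyMax q + 1) (k - 1) + 1) 1).map (fun lab => q ++ [lab])).filter
              (fun q' => decide (N - (q'.length : Int) ≥ k - 1 - pyMax q'))))
          [p]).foldl (fun out q => if okB k min_block q then out ++ [q] else out) []) := by
  by_cases hval : ∀ lab ∈ p, 0 ≤ lab ∧ lab < k
  · have hany : (p.any fun lab => !(decide (0 ≤ lab) && decide (lab < k))) = false := by
      simp only [List.any_eq_false, Bool.not_eq_true', Bool.and_eq_false_iff,
        decide_eq_false_iff_not]
      intro x hx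
      rcases hval x hx with ⟨h0, h1⟩
      simp [h0, h1]
    obtain ⟨sizes', h1, h2, h3⟩ := countsOf?_some hval (List.replicate k.toNat 0) (by simp)
    have hlen' : sizes'.length = k.toNat := by simpa using h2
    have hcnt : ∀ j : Nat, j < k.toNat → sizes'.getD j 0 = ((p.count (j : Int) : Int)) := by
      intro j hj
      have := h3 j (by simpa using hj)
      simpa using this
    rw [hany]
    simp only [Bool.false_eq_true, if_false]
    rw [frontier_eq, PySem.List.foldl_append_if_eq_filter, List.nil_append,
      expandP_filter N k min_block _ p hp (by omega)]
    by_cases hleaf : (p.length : Int) = N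
    · rw [if_pos hleaf]
      have hn0 : (N - (p.length : Int)).toNat = 0 := by omega
      rw [hn0]
      have hall := sizes_all_iff (k := k) (min_block := min_block) (q := p) hlen' hcnt
      simp only [h1, expandT, List.filter_singleton, okB, ← hall]
      cases hsz : (sizes'.take k.toNat).all (fun s => decide (min_block ≤ s)) <;>
        by_cases hok : pyMax p = k - 1 <;> simp [hok]
    · rw [if_neg hleaf]
      simp only [h1]
      exact btA_eq N k min_block _ p sizes' hp hval (by omega) rfl hlen' hcnt
  · have hany : (p.any fun lab => !(decide (0 ≤ lab) && decide (lab < k))) = true := by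
      simp only [List.any_eq_true, Bool.not_eq_true', Bool.and_eq_false_iff,
        decide_eq_false_iff_not]
      push Not at hval
      obtain ⟨x, hx, hnx⟩ := hval
      refine ⟨x, hx, ?_⟩
      by_cases h0 : 0 ≤ x
      · exact Or.inr (fun h1 => absurd (hnx h0) (by omega))
      · exact Or.inl h0
    have hnone := countsOf?_none (k := k) (p := p)
      (by push Not at hval; obtain ⟨x, hx, hnx⟩ := hval
          exact ⟨x, hx, fun hc => absurd (hnx hc.1) (by omega)⟩)
      (List.replicate k.toNat 0)
    rw [hany]
    simp [hnone]


theorem main_eq (prefix_ : List Int) (N k min_block : Int)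
    (hpre : ¬ (prefix_ = [] ∧ N = 0 ∧ 1 ≤ k)) :
    complete_from_prefix prefix_ N k min_block = complete_from_prefix_alt prefix_ N k min_block := by
  by_cases hpe : prefix_ = []
  · subst hpe
    rcases lt_trichotomy N 0 with hN | hN | hN
    · simp only [complete_from_prefix, complete_from_prefix_alt, List.length_nil,
        List.isEmpty_nil, Nat.cast_zero]
      rw [if_pos (by omega : (0:Int) > N)]
      simp only [if_true]
      rw [if_pos (by simp; omega)]
    · subst hN
      have hk : k ≤ 0 := by
        by_contra hk
        exact hpre ⟨rfl, rfl, by omega⟩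
      have hnone := countsOf?_none (k := k) (p := [0])
        (⟨0, by simp, by omega⟩) (List.replicate k.toNat 0)
      simp [complete_from_prefix, complete_from_prefix_alt, hnone]
    · have hcore := core_eq N k min_block [0] (by simp) (by simp; omega)
      have hng : ¬ ((0:Int) > N) := by omega
      have hng1 : ¬ ((1:Int) > N) := by omega
      simp only [complete_from_prefix, complete_from_prefix_alt]
      norm_num [hng, hng1] at hcore ⊢
      exact hcore
  · have hm0 : ¬ ((prefix_.length : Int) = 0) := by
      have h := List.length_pos_iff.2 hpe; omega
    have hie : prefix_.isEmpty = false := by simpa using hpe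
    by_cases hmN : (prefix_.length : Int) > N
    · simp only [complete_from_prefix, complete_from_prefix_alt, hie, Bool.false_eq_true,
        if_false, if_pos hmN]
    · have hcore := core_eq N k min_block prefix_ hpe (by omega)
      simp only [complete_from_prefix, complete_from_prefix_alt, hie, Bool.false_eq_true,
        if_false, if_neg hmN, if_neg hm0]
      exact hcore

-- ===== VERDICT (by name: the statement is the Claim_ definition above) =====
theorem complete_from_prefix_spec : Claim_equal_complete_from_prefix := by
  intro prefix_ N k min_block _ hpre
  exact main_eq prefix_ N k min_block hpre
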